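-- pv_equiv track=rewrite | github.com/RUOK90/MyDL | lib/preprocess.py | get_sorted_by_len_samples
-- ===== SOURCE A (Python) =====
-- def get_sorted_by_len_idxs(xs, idxs) :
-- 	return sorted(idxs, key = lambda idx : len(xs[idx]))
--
-- def get_sorted_by_len_samples(xs, ys, idxs, maxlen) :
-- 	sorted_idxs = get_sorted_by_len_idxs(xs, idxs)
-- 	sorted_xs = []
-- 	sorted_ys = []
--
-- 	for idx in sorted_idxs :
-- 		if maxlen != None and len(xs[idx]) > maxlen :
-- 			break
-- 		sorted_xs.append(xs[idx])
-- 		sorted_ys.append(ys[idx])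
--
-- 	return sorted_xs, sorted_ys
-- ===== SOURCE B (Python) =====
-- def get_sorted_by_len_samples(xs, ys, idxs, maxlen):
--     kept = [idx for idx in idxs if maxlen is None or len(xs[idx]) <= maxlen]
--     kept.sort(key=lambda idx: len(xs[idx]))
--     return [xs[idx] for idx in kept], [ys[idx] for idx in kept]
-- ===== Notes on version B (the rewrite author's own statement) =====
-- stated objective: simpler
-- what changed: B filters the indices by length first (keeping all when maxlen is None), then stably sorts only the kept indices and builds both outputs by comprehensions, instead of sorting everything and breaking out of a collection loop.
import Mathlib
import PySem

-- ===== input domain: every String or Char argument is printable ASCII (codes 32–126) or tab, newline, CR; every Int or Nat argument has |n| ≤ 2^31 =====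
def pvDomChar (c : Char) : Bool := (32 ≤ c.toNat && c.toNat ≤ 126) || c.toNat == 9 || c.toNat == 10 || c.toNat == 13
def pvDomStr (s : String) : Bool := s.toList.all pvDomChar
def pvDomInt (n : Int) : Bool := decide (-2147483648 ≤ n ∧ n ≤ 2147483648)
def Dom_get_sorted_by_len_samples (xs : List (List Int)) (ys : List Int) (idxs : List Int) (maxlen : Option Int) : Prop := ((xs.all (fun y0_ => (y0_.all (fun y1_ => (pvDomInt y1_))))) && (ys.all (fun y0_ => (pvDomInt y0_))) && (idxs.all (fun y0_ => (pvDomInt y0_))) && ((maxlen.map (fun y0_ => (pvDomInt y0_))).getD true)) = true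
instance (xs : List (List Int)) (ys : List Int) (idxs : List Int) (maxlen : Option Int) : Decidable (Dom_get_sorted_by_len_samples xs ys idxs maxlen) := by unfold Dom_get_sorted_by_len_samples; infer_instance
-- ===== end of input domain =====

-- B filters the indices by length first, then stably sorts only the kept ones and builds both
-- outputs by comprehensions, instead of A's sort-everything-then-break collection loop (objective: simpler).

-- ===== PORT A =====
-- len(xs[idx]) as used by A's sort key (index may be negative: Python wraparound via pyGet?;
-- an out-of-range idx raises in Python and is excluded by Pre_, the port defaults to []).
def pvKey (xs : List (List Int)) (idx : Int) : Nat :=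
  ((PySem.List.pyGet? xs idx).getD []).length

-- the 'for idx in sorted_idxs' loop with its break
def pvLoopA (xs : List (List Int)) (ys : List Int) (maxlen : Option Int) : List Int → List (List Int) × List Int
  | [] => ([], [])
  | idx :: rest =>
    if (match maxlen with | none => false | some m => decide (m < (pvKey xs idx : Int))) then
      ([], [])
    else
      let r := pvLoopA xs ys maxlen rest
      ((PySem.List.pyGet? xs idx).getD [] :: r.1, (PySem.List.pyGet? ys idx).getD 0 :: r.2)

def get_sorted_by_len_idxs (xs : List (List Int)) (idxs : List Int) : List Int :=
  PySem.List.sorted idxs (fun idx => pvKey xs idx) false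

def get_sorted_by_len_samples (xs : List (List Int)) (ys : List Int) (idxs : List Int) (maxlen : Option Int) : List (List Int) × List Int :=
  pvLoopA xs ys maxlen (get_sorted_by_len_idxs xs idxs)

-- ===== PORT B =====
-- the filter predicate: maxlen is None or len(xs[idx]) <= maxlen
def pvKeep (xs : List (List Int)) (maxlen : Option Int) (idx : Int) : Bool :=
  match maxlen with
  | none => true
  | some m => decide ((pvKey xs idx : Int) ≤ m)

def get_sorted_by_len_samples_alt (xs : List (List Int)) (ys : List Int) (idxs : List Int) (maxlen : Option Int) : List (List Int) × List Int :=
  let kept := idxs.filter (pvKeep xs maxlen)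
  let sk := PySem.List.sorted kept (fun idx => pvKey xs idx) false
  (sk.map (fun idx => (PySem.List.pyGet? xs idx).getD []),
   sk.map (fun idx => (PySem.List.pyGet? ys idx).getD 0))

-- ===== PRECONDITION & SPEC =====
-- Exactly the inputs on which Python A returns: every index must be in range for xs (the sort key
-- evaluates len(xs[idx]) on all of them), and every kept index (reached before the break) in range for ys.
def Pre_get_sorted_by_len_samples (xs : List (List Int)) (ys : List Int) (idxs : List Int) (maxlen : Option Int) : Prop :=
  (∀ idx ∈ idxs, PySem.Raise.InRange xs.length idx) ∧
  (∀ idx ∈ idxs, pvKeep xs maxlen idx = true → PySem.Raise.InRange ys.length idx)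
instance (xs : List (List Int)) (ys : List Int) (idxs : List Int) (maxlen : Option Int) : Decidable (Pre_get_sorted_by_len_samples xs ys idxs maxlen) := by unfold Pre_get_sorted_by_len_samples; infer_instance

def pvWitness_get_sorted_by_len_samples : List (List Int) × List Int × List Int × Option Int :=
  ([[1], [2, 3]], [10, 20], [0, 1], some 1)

def Spec_get_sorted_by_len_samples (xs : List (List Int)) (ys : List Int) (idxs : List Int) (maxlen : Option Int) (out : List (List Int) × List Int) : Prop := out = get_sorted_by_len_samples_alt xs ys idxs maxlen
instance (xs : List (List Int)) (ys : List Int) (idxs : List Int) (maxlen : Option Int) (out : List (List Int) × List Int) : Decidable (Spec_get_sorted_by_len_samples xs ys idxs maxlen out) := by unfold Spec_get_sorted_by_len_samples; infer_instance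

-- ===== CLAIM (what is proved, stated in full; the proofs are below) =====
def Claim_equal_get_sorted_by_len_samples : Prop := ∀ (xs : List (List Int)) (ys : List Int) (idxs : List Int) (maxlen : Option Int), Dom_get_sorted_by_len_samples xs ys idxs maxlen → Pre_get_sorted_by_len_samples xs ys idxs maxlen → Spec_get_sorted_by_len_samples xs ys idxs maxlen (get_sorted_by_len_samples xs ys idxs maxlen)

-- ===== LEMMAS AND PROOFS =====

-- pvKeep is downward closed in the key
theorem pvKeep_mono (xs : List (List Int)) (maxlen : Option Int) {a b : Int}
    (h : pvKey xs a ≤ pvKey xs b) (hb : pvKeep xs maxlen b = true) : pvKeep xs maxlen a = true := by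
  cases maxlen with
  | none => simp [pvKeep]
  | some m => simp [pvKeep] at *; omega

-- a head failing pvKeep in a key-sorted list kills the whole filter
theorem pvFilter_nil_of_head (xs : List (List Int)) (maxlen : Option Int) (y : Int) (t : List Int)
    (hy : ∀ z ∈ t, pvKey xs y ≤ pvKey xs z) (hky : ¬ pvKeep xs maxlen y = true) :
    (y :: t).filter (pvKeep xs maxlen) = [] := by
  rw [List.filter_cons]
  simp only [hky]
  · exact List.filter_eq_nil_iff.mpr (fun z hz hk => hky (pvKeep_mono xs maxlen (hy z hz) hk))

-- filtering commutes with one insertion step of the stable insertion sort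
theorem pvFilter_insertBy (xs : List (List Int)) (maxlen : Option Int) (x : Int) (acc : List Int)
    (hs : acc.Pairwise (fun a b => pvKey xs a ≤ pvKey xs b)) :
    (PySem.List.insertBy (fun a b => decide (pvKey xs a < pvKey xs b)) x acc).filter (pvKeep xs maxlen)
      = if pvKeep xs maxlen x then
          PySem.List.insertBy (fun a b => decide (pvKey xs a < pvKey xs b)) x (acc.filter (pvKeep xs maxlen))
        else acc.filter (pvKeep xs maxlen) := by
  induction acc with
  | nil => by_cases px : pvKeep xs maxlen x = true <;> simp [PySem.List.insertBy, px]
  | cons y t ih =>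
    rw [List.pairwise_cons] at hs
    obtain ⟨hy, ht⟩ := hs
    by_cases hb : pvKey xs x < pvKey xs y
    · by_cases px : pvKeep xs maxlen x = true
      · by_cases py : pvKeep xs maxlen y = true
        · simp [PySem.List.insertBy, hb, px, py]
        · have hnt : (y :: t).filter (pvKeep xs maxlen) = [] := pvFilter_nil_of_head xs maxlen y t hy py
          simp [PySem.List.insertBy, hb, px, hnt]
      · simp [PySem.List.insertBy, hb, px, List.filter_cons]
    · have hyx : pvKey xs y ≤ pvKey xs x := Nat.le_of_not_lt hb
      by_cases px : pvKeep xs maxlen x = true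
      · have py : pvKeep xs maxlen y = true := pvKeep_mono xs maxlen hyx px
        simp [PySem.List.insertBy, hb, px, py, ih ht]
      · simp [PySem.List.insertBy, hb, px, List.filter_cons, ih ht]

-- sorting l ++ [x] is inserting x into sorted l (the foldl shape of the insertion sort)
theorem pvSorted_append_singleton (l : List Int) (x : Int) (key : Int → Nat) :
    PySem.List.sorted (l ++ [x]) key false
      = PySem.List.insertBy (fun a b => decide (key a < key b)) x (PySem.List.sorted l key false) := by
  rw [PySem.List.sorted_eq_foldl_insertBy, PySem.List.sorted_eq_foldl_insertBy, List.foldl_append]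
  rfl

-- filtering by pvKeep commutes with the stable sort by pvKey
theorem pvFilter_sorted (xs : List (List Int)) (maxlen : Option Int) (l : List Int) :
    (PySem.List.sorted l (fun idx => pvKey xs idx) false).filter (pvKeep xs maxlen)
      = PySem.List.sorted (l.filter (pvKeep xs maxlen)) (fun idx => pvKey xs idx) false := by
  induction l using List.reverseRecOn with
  | nil => simp [PySem.List.sorted_eq_foldl_insertBy]
  | append_singleton l x ih =>
    rw [pvSorted_append_singleton,
      pvFilter_insertBy xs maxlen x _ (PySem.List.sorted_pairwise l (fun idx => pvKey xs idx)),
      ih, List.filter_append]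
    by_cases px : pvKeep xs maxlen x = true
    · simp only [List.filter_cons, px, if_true, List.filter_nil]
      rw [← pvSorted_append_singleton]
    · simp [px]

-- A's break test is the negation of B's keep test
theorem pvBreak_eq (xs : List (List Int)) (maxlen : Option Int) (idx : Int) :
    (match maxlen with | none => false | some m => decide (m < (pvKey xs idx : Int)))
      = !pvKeep xs maxlen idx := by
  cases maxlen with
  | none => simp [pvKeep]
  | some m =>
    simp only [pvKeep, ← decide_not, decide_eq_decide]
    omega

-- on a key-sorted list, A's break loop is: filter, then map both projections
theorem pvLoopA_eq (xs : List (List Int)) (ys : List Int) (maxlen : Option Int) (s : List Int)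
    (hs : s.Pairwise (fun a b => pvKey xs a ≤ pvKey xs b)) :
    pvLoopA xs ys maxlen s
      = ((s.filter (pvKeep xs maxlen)).map (fun idx => (PySem.List.pyGet? xs idx).getD []),
         (s.filter (pvKeep xs maxlen)).map (fun idx => (PySem.List.pyGet? ys idx).getD 0)) := by
  induction s with
  | nil => simp [pvLoopA]
  | cons idx rest ih =>
    rw [List.pairwise_cons] at hs
    obtain ⟨hh, ht⟩ := hs
    simp only [pvLoopA]
    rw [pvBreak_eq]
    by_cases pk : pvKeep xs maxlen idx = true
    · simp [pk, ih ht]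
    · rw [pvFilter_nil_of_head xs maxlen idx rest hh pk]
      simp [pk]

-- ===== VERDICT (by name: the statement is the Claim_ definition above) =====
theorem get_sorted_by_len_samples_spec : Claim_equal_get_sorted_by_len_samples := by
  intro xs ys idxs maxlen _hdom _hpre
  unfold Spec_get_sorted_by_len_samples get_sorted_by_len_samples get_sorted_by_len_idxs
    get_sorted_by_len_samples_alt
  rw [pvLoopA_eq xs ys maxlen _ (PySem.List.sorted_pairwise idxs (fun idx => pvKey xs idx)),
    pvFilter_sorted]
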